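-- pv_equiv track=rewrite | github.com/vibeforge1111/spark-intelligence-builder | src/spark_intelligence/self_awareness/capsule.py | _humanize_style_instruction
-- ===== SOURCE A (Python) =====
-- def _humanize_style_instruction(value: str) -> str:
--     parts = [part.strip(" .") for part in value.replace("\n", ";").split(";") if part.strip(" .")]
--     cleaned: list[str] = []
--     for part in parts[:3]:
--         lower_part = part.lower()
--         if lower_part.startswith("do not say "):
--             part = f"avoid saying {part[11:]}"
--         elif lower_part.startswith("don't say "):
--             part = f"avoid saying {part[10:]}"
--         elif lower_part.startswith("dont say "):
--             part = f"avoid saying {part[9:]}"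
--         elif lower_part.startswith("do not claim "):
--             part = f"avoid claiming {part[13:]}"
--         elif lower_part.startswith("don't claim "):
--             part = f"avoid claiming {part[12:]}"
--         elif lower_part.startswith("dont claim "):
--             part = f"avoid claiming {part[11:]}"
--         elif lower_part.startswith("do not "):
--             part = f"avoid {part[7:]}"
--         elif lower_part.startswith("don't "):
--             part = f"avoid {part[6:]}"
--         elif lower_part.startswith("dont "):
--             part = f"avoid {part[5:]}"
--         cleaned.append(part[:1].lower() + part[1:])
--     if not cleaned:
--         return value
--     return _human_join(cleaned)
--
-- def _human_join(items: list[str]) -> str: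
--     if len(items) <= 1:
--         return "".join(items)
--     if len(items) == 2:
--         return f"{items[0]} and {items[1]}"
--     return f"{', '.join(items[:-1])}, and {items[-1]}"
-- ===== SOURCE B (Python) =====
-- # B: factored two-stage rewrite (negation prefix, then verb) instead of A's 9-branch cascade.
-- _NEGATIONS = ("do not ", "don't ", "dont ")
--
--
-- def _soften(part: str) -> str:
--     for neg in _NEGATIONS:
--         if part.lower().startswith(neg):
--             rest = part[len(neg):]
--             low = rest.lower()
--             if low.startswith("say "):
--                 part = "avoid saying " + rest[4:]
--             elif low.startswith("claim "):
--                 part = "avoid claiming " + rest[6:]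
--             else:
--                 part = "avoid " + rest
--             break
--     return part[:1].lower() + part[1:]
--
--
-- def _human_join(items: list[str]) -> str:
--     if len(items) <= 1:
--         return "".join(items)
--     if len(items) == 2:
--         return f"{items[0]} and {items[1]}"
--     return f"{', '.join(items[:-1])}, and {items[-1]}"
--
--
-- def _humanize_style_instruction(value: str) -> str:
--     parts = [p.strip(" .") for p in value.replace("\n", ";").split(";") if p.strip(" .")]
--     cleaned = [_soften(part) for part in parts[:3]]
--     return _human_join(cleaned) if cleaned else value
-- ===== Notes on version B (the rewrite author's own statement) =====
-- stated objective: simpler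
-- what changed: Replaced A's 9-branch prefix cascade with a factored two-stage rewrite (detect one of three negation prefixes, then dispatch on say/claim/other over the remainder) and the explicit append loop with a comprehension/map.
import Mathlib
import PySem

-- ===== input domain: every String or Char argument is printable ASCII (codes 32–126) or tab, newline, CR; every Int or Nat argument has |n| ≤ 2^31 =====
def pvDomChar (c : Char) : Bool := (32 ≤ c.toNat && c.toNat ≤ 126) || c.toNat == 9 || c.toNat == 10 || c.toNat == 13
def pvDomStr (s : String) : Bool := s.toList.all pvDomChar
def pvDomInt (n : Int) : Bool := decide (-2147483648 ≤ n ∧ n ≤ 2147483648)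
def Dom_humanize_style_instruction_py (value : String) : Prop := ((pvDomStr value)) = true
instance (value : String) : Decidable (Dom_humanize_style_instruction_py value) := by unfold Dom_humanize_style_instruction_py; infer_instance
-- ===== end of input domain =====

-- B replaces A's 9-branch prefix cascade by a factored two-stage rewrite (negation prefix, then verb); objective: simpler.
-- Shared helpers: both Pythons contain the identical parts-splitting comprehension, _human_join and the lower-first-char step.
def pvStrip (p : List Char) : List Char := PySem.Chars.stripChars p [' ', '.']

def pvParts (v : List Char) : List (List Char) :=
  ((PySem.Chars.splitOn (PySem.Chars.replace v ['\n'] [';']) [';']).map pvStrip).filter (· ≠ [])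

def pvLowerFirst (p : List Char) : List Char :=
  PySem.Chars.lower (p.take 1) ++ p.drop 1

def pvHumanJoin (items : List (List Char)) : List Char :=
  if items.length ≤ 1 then PySem.Chars.join [] items
  else if items.length = 2 then
    items.getD 0 [] ++ " and ".toList ++ items.getD 1 []
  else
    PySem.Chars.join ", ".toList (PySem.List.slice items none (some (-1)))
      ++ ", and ".toList ++ (PySem.List.pyGet? items (-1)).getD []

-- ===== PORT A =====
-- per-part rewrite of A: the 9-branch cascade, in source order
def pvFixA (part : List Char) : List Char :=
  let lp := PySem.Chars.lower part
  if PySem.Chars.startswith lp "do not say ".toList then "avoid saying ".toList ++ part.drop 11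
  else if PySem.Chars.startswith lp "don't say ".toList then "avoid saying ".toList ++ part.drop 10
  else if PySem.Chars.startswith lp "dont say ".toList then "avoid saying ".toList ++ part.drop 9
  else if PySem.Chars.startswith lp "do not claim ".toList then "avoid claiming ".toList ++ part.drop 13
  else if PySem.Chars.startswith lp "don't claim ".toList then "avoid claiming ".toList ++ part.drop 12
  else if PySem.Chars.startswith lp "dont claim ".toList then "avoid claiming ".toList ++ part.drop 11
  else if PySem.Chars.startswith lp "do not ".toList then "avoid ".toList ++ part.drop 7
  else if PySem.Chars.startswith lp "don't ".toList then "avoid ".toList ++ part.drop 6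
  else if PySem.Chars.startswith lp "dont ".toList then "avoid ".toList ++ part.drop 5
  else part

def humanize_style_instruction_py (value : String) : String :=
  let parts := pvParts value.toList
  let cleaned := (PySem.List.slice parts none (some 3)).foldl
    (fun acc part => acc ++ [pvLowerFirst (pvFixA part)]) []
  if cleaned = [] then value else String.ofList (pvHumanJoin cleaned)

-- ===== PORT B =====
-- per-part rewrite of B: find the negation prefix, then dispatch on the verb of the remainder
def pvSoften (part : List Char) : List Char :=
  let part' :=
    match ["do not ".toList, "don't ".toList, "dont ".toList].find?
        (fun neg => PySem.Chars.startswith (PySem.Chars.lower part) neg) with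
    | none => part
    | some neg =>
      let rest := part.drop neg.length
      let low := PySem.Chars.lower rest
      if PySem.Chars.startswith low "say ".toList then "avoid saying ".toList ++ rest.drop 4
      else if PySem.Chars.startswith low "claim ".toList then "avoid claiming ".toList ++ rest.drop 6
      else "avoid ".toList ++ rest
  pvLowerFirst part'

def humanize_style_instruction_py_alt (value : String) : String :=
  let cleaned := ((pvParts value.toList).take 3).map pvSoften
  if cleaned = [] then value else String.ofList (pvHumanJoin cleaned)

-- ===== PRECONDITION & SPEC =====
def Spec_humanize_style_instruction_py (value : String) (out : String) : Prop := out = humanize_style_instruction_py_alt value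
instance (value : String) (out : String) : Decidable (Spec_humanize_style_instruction_py value out) := by unfold Spec_humanize_style_instruction_py; infer_instance

-- ===== CLAIM (what is proved, stated in full; the proofs are below) =====
def Claim_equal_humanize_style_instruction_py : Prop := ∀ (value : String), Dom_humanize_style_instruction_py value → Spec_humanize_style_instruction_py value (humanize_style_instruction_py value)

-- ===== LEMMAS AND PROOFS =====
theorem pfx_append_iff (p q s : List Char) : p ++ q <+: s ↔ p <+: s ∧ q <+: s.drop p.length := by
  constructor
  · intro h
    have hp : p <+: s := (List.prefix_append p q).trans h
    obtain ⟨t, rfl⟩ := hp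
    rw [List.drop_left]
    exact ⟨List.prefix_append p t, (List.prefix_append_right_inj p).1 h⟩
  · rintro ⟨⟨t, rfl⟩, hq⟩
    rw [List.drop_left] at hq
    exact (List.prefix_append_right_inj p).2 hq

theorem lower_drop (n : ℕ) (l : List Char) :
    (PySem.Chars.lower l).drop n = PySem.Chars.lower (l.drop n) := by
  simp [PySem.Chars.lower, List.map_drop]

theorem sw_true {s p : List Char} (h : p <+: s) : PySem.Chars.startswith s p = true :=
  (PySem.Chars.startswith_iff s p).mpr h

theorem sw_false {s p : List Char} (h : ¬ p <+: s) : PySem.Chars.startswith s p = false := by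
  cases hb : PySem.Chars.startswith s p
  · rfl
  · exact absurd ((PySem.Chars.startswith_iff s p).mp hb) h

-- a condition whose pattern extends an unmatched negation prefix is false
theorem sw_false_outer {s outer p : List Char} (houter : ¬ outer <+: s) (hp : outer <+: p) :
    PySem.Chars.startswith s p = false :=
  sw_false (fun h => houter (hp.trans h))

-- the three negation prefixes are mutually exclusive
theorem pfx_excl {p q s : List Char} (hq : q <+: s) (hp : p <+: s)
    (hlen : q.length ≤ p.length) (hnq : ¬ q <+: p) : False :=
  hnq (List.prefix_of_prefix_length_le hq hp hlen)

-- splitting a matched A-condition "neg ++ verb" at the negation prefix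
theorem sw_split {s neg verb pat : List Char} (hpat : pat = neg ++ verb) (h : neg <+: s) :
    PySem.Chars.startswith s pat = PySem.Chars.startswith (s.drop neg.length) verb := by
  subst hpat
  by_cases hv : verb <+: s.drop neg.length
  · rw [sw_true ((pfx_append_iff neg verb s).mpr ⟨h, hv⟩), sw_true hv]
  · rw [sw_false (fun hc => hv ((pfx_append_iff neg verb s).mp hc).2), sw_false hv]

-- the two per-part rewrites agree, given the negation prefix matched at offset k
theorem matched_core (part : List Char) (k : ℕ) :
    (if PySem.Chars.startswith (PySem.Chars.lower (part.drop k)) "say ".toList then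
        "avoid saying ".toList ++ part.drop (k + 4)
      else if PySem.Chars.startswith (PySem.Chars.lower (part.drop k)) "claim ".toList then
        "avoid claiming ".toList ++ part.drop (k + 6)
      else "avoid ".toList ++ part.drop k)
    = (if PySem.Chars.startswith (PySem.Chars.lower (part.drop k)) "say ".toList then
        "avoid saying ".toList ++ (part.drop k).drop 4
      else if PySem.Chars.startswith (PySem.Chars.lower (part.drop k)) "claim ".toList then
        "avoid claiming ".toList ++ (part.drop k).drop 6
      else "avoid ".toList ++ part.drop k) := by
  rw [List.drop_drop, List.drop_drop]

theorem pvFix_eq_soften (part : List Char) : pvLowerFirst (pvFixA part) = pvSoften part := by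
  unfold pvFixA pvSoften
  by_cases h1 : "do not ".toList <+: PySem.Chars.lower part
  · have hA2 : ¬ ("don't ".toList <+: PySem.Chars.lower part) :=
      fun h => pfx_excl h h1 (by decide) (by decide)
    have hA3 : ¬ ("dont ".toList <+: PySem.Chars.lower part) :=
      fun h => pfx_excl h h1 (by decide) (by decide)
    rw [List.find?_cons_of_pos (sw_true h1)]
    simp only [sw_split (by decide : "do not say ".toList = "do not ".toList ++ "say ".toList) h1,
      sw_split (by decide : "do not claim ".toList = "do not ".toList ++ "claim ".toList) h1,
      sw_false_outer (p := "don't say ".toList) hA2 (by decide),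
      sw_false_outer (p := "dont say ".toList) hA3 (by decide),
      sw_false_outer (p := "don't claim ".toList) hA2 (by decide),
      sw_false_outer (p := "dont claim ".toList) hA3 (by decide),
      sw_true h1, if_true, Bool.false_eq_true, if_false,
      (by decide : ("do not ".toList).length = 7), lower_drop]
    exact congrArg pvLowerFirst (matched_core part 7)
  · by_cases h2 : "don't ".toList <+: PySem.Chars.lower part
    · have hA3 : ¬ ("dont ".toList <+: PySem.Chars.lower part) :=
        fun h => pfx_excl h h2 (by decide) (by decide)
      rw [List.find?_cons_of_neg (by rw [sw_false h1]; exact Bool.false_ne_true),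
        List.find?_cons_of_pos (sw_true h2)]
      simp only [sw_split (by decide : "don't say ".toList = "don't ".toList ++ "say ".toList) h2,
        sw_split (by decide : "don't claim ".toList = "don't ".toList ++ "claim ".toList) h2,
        sw_false_outer (p := "do not say ".toList) h1 (by decide),
        sw_false_outer (p := "dont say ".toList) hA3 (by decide),
        sw_false_outer (p := "do not claim ".toList) h1 (by decide),
        sw_false_outer (p := "dont claim ".toList) hA3 (by decide),
        sw_true h2, sw_false h1, if_true, Bool.false_eq_true, if_false,
        (by decide : ("don't ".toList).length = 6), lower_drop]
      exact congrArg pvLowerFirst (matched_core part 6)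
    · by_cases h3 : "dont ".toList <+: PySem.Chars.lower part
      · rw [List.find?_cons_of_neg (by rw [sw_false h1]; exact Bool.false_ne_true),
          List.find?_cons_of_neg (by rw [sw_false h2]; exact Bool.false_ne_true),
          List.find?_cons_of_pos (sw_true h3)]
        simp only [sw_split (by decide : "dont say ".toList = "dont ".toList ++ "say ".toList) h3,
          sw_split (by decide : "dont claim ".toList = "dont ".toList ++ "claim ".toList) h3,
          sw_false_outer (p := "do not say ".toList) h1 (by decide),
          sw_false_outer (p := "don't say ".toList) h2 (by decide),
          sw_false_outer (p := "do not claim ".toList) h1 (by decide),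
          sw_false_outer (p := "don't claim ".toList) h2 (by decide),
          sw_true h3, sw_false h1, sw_false h2, if_true, Bool.false_eq_true, if_false,
          (by decide : ("dont ".toList).length = 5), lower_drop]
        exact congrArg pvLowerFirst (matched_core part 5)
      · rw [List.find?_cons_of_neg (by rw [sw_false h1]; exact Bool.false_ne_true),
          List.find?_cons_of_neg (by rw [sw_false h2]; exact Bool.false_ne_true),
          List.find?_cons_of_neg (by rw [sw_false h3]; exact Bool.false_ne_true),
          List.find?_nil]
        simp only [sw_false_outer (p := "do not say ".toList) h1 (by decide),
          sw_false_outer (p := "don't say ".toList) h2 (by decide),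
          sw_false_outer (p := "dont say ".toList) h3 (by decide),
          sw_false_outer (p := "do not claim ".toList) h1 (by decide),
          sw_false_outer (p := "don't claim ".toList) h2 (by decide),
          sw_false_outer (p := "dont claim ".toList) h3 (by decide),
          sw_false h1, sw_false h2, sw_false h3, Bool.false_eq_true, if_false]

-- ===== VERDICT (by name: the statement is the Claim_ definition above) =====
theorem humanize_style_instruction_py_spec : Claim_equal_humanize_style_instruction_py := by
  intro value _
  unfold Spec_humanize_style_instruction_py humanize_style_instruction_py humanize_style_instruction_py_alt
  simp only [PySem.List.slice_to _ (by norm_num : (0:Int) ≤ 3),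
    PySem.List.foldl_append_singleton_eq_map, List.nil_append, funext pvFix_eq_soften,
    (show Int.toNat 3 = 3 from rfl)]
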